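-- pv_equiv track=rewrite | github.com/DrewThomas09/RCM | RCM_MC/rcm_mc/diligence/benchmarks/_ansi_codes.py | classify_carc_set
-- ===== SOURCE A (Python) =====
-- from enum import Enum
-- from typing import Dict, Optional
--
-- class DenialCategory(str, Enum):
--     FRONT_END = "FRONT_END"        # Eligibility, coverage, registration
--     CODING = "CODING"              # Coding errors, missing info
--     CLINICAL = "CLINICAL"          # Medical necessity, prior-auth
--     PAYER_BEHAVIOR = "PAYER_BEHAVIOR"   # Timely filing, duplicate, payer policy
--     CONTRACTUAL = "CONTRACTUAL"    # Allowed-amount adjustments (not a "denial" in the partner sense)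
--     UNCLASSIFIED = "UNCLASSIFIED"  # Code not in our rule file
--
-- _CARC_MAP: Dict[str, DenialCategory] = {
--     # Contractual adjustments — NOT denials, but appear as CARC on 835s.
--     "45":  DenialCategory.CONTRACTUAL,     # Charge exceeds fee schedule
--     "253": DenialCategory.CONTRACTUAL,     # Sequestration
--
--     # Front-end: coverage / eligibility / registration
--     "27":  DenialCategory.FRONT_END,       # Expenses incurred after coverage terminated
--     "26":  DenialCategory.FRONT_END,       # Expenses incurred prior to coverage
--     "31":  DenialCategory.FRONT_END,       # Patient cannot be identified as our insured
--     "35":  DenialCategory.FRONT_END,       # Lifetime benefit maximum has been reached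
--     "96":  DenialCategory.FRONT_END,       # Non-covered charge(s)
--     "109": DenialCategory.FRONT_END,       # Claim/service not covered by this payer
--     "140": DenialCategory.FRONT_END,       # Patient/insured health identification number invalid
--     "204": DenialCategory.FRONT_END,       # Not covered under patient current benefit plan
--
--     # Coding: information, code validity, consistency
--     "4":   DenialCategory.CODING,          # Procedure code inconsistent with modifier
--     "5":   DenialCategory.CODING,          # Procedure code inconsistent with place of service
--     "6":   DenialCategory.CODING,          # Procedure code inconsistent with patient age
--     "7":   DenialCategory.CODING,          # Procedure code inconsistent with patient gender
--     "11":  DenialCategory.CODING,          # Diagnosis inconsistent with procedure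
--     "16":  DenialCategory.CODING,          # Claim/service lacks information or has submission errors
--     "18":  DenialCategory.CODING,          # Exact duplicate claim/service (handled here — payer perspective)
--     "125": DenialCategory.CODING,          # Submission/billing error
--     "181": DenialCategory.CODING,          # Procedure code invalid on date of service
--
--     # Clinical: medical necessity / prior-auth / experimental
--     "50":  DenialCategory.CLINICAL,        # Non-covered: not medically necessary
--     "55":  DenialCategory.CLINICAL,        # Procedure/treatment considered experimental
--     "150": DenialCategory.CLINICAL,        # Information submitted does not support this level of service
--     "167": DenialCategory.CLINICAL,        # Diagnosis not covered
--     "197": DenialCategory.CLINICAL,        # Precertification/authorization/notification absent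
--     "198": DenialCategory.CLINICAL,        # Precertification/authorization exceeded
--
--     # Payer behaviour: timing, duplicates, coordination, policy
--     "18":  DenialCategory.PAYER_BEHAVIOR,  # Duplicate (overrides CODING when seen in volume)
--     "22":  DenialCategory.PAYER_BEHAVIOR,  # Care may be covered by another payer (COB)
--     "23":  DenialCategory.PAYER_BEHAVIOR,  # Impact of prior-payer adjudication (OA-23 on ZBA)
--     "29":  DenialCategory.PAYER_BEHAVIOR,  # Time limit for filing expired
--     "39":  DenialCategory.PAYER_BEHAVIOR,  # Services denied at time auth was requested
--     "151": DenialCategory.PAYER_BEHAVIOR,  # Payment adjusted: excessive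
--     "252": DenialCategory.PAYER_BEHAVIOR,  # An attachment/other documentation is required
-- }
--
-- def classify_carc(code: str) -> DenialCategory:
--     """Return the category for a single CARC. Normalises code
--     formatting (strips whitespace and a leading 'CO'/'OA'/'PI' if
--     present — those are Group Codes, not CARCs)."""
--     if not code:
--         return DenialCategory.UNCLASSIFIED
--     raw = str(code).strip().upper()
--     # Remove common group-code prefixes like 'CO-45', 'OA-23', 'PI-96'.
--     for prefix in ("CO-", "OA-", "PI-", "PR-", "CO ", "OA ", "PI ", "PR "):
--         if raw.startswith(prefix):
--             raw = raw[len(prefix):]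
--             break
--     # Keep only digits/letters.
--     raw = "".join(ch for ch in raw if ch.isalnum())
--     return _CARC_MAP.get(raw, DenialCategory.UNCLASSIFIED)
--
-- def classify_carc_set(codes) -> DenialCategory:
--     """Pick the most-severe category from a set of CARCs on a single
--     claim. Precedence is the category that best describes root cause
--     for Pareto analysis: CLINICAL > CODING > PAYER_BEHAVIOR >
--     FRONT_END > CONTRACTUAL > UNCLASSIFIED."""
--     precedence = [
--         DenialCategory.CLINICAL, DenialCategory.CODING,
--         DenialCategory.PAYER_BEHAVIOR, DenialCategory.FRONT_END,
--         DenialCategory.CONTRACTUAL, DenialCategory.UNCLASSIFIED,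
--     ]
--     observed = {classify_carc(c) for c in (codes or ())}
--     for cat in precedence:
--         if cat in observed:
--             return cat
--     return DenialCategory.UNCLASSIFIED
-- ===== SOURCE B (Python) =====
-- from enum import Enum
--
-- class DenialCategory(str, Enum):
--     FRONT_END = "FRONT_END"
--     CODING = "CODING"
--     CLINICAL = "CLINICAL"
--     PAYER_BEHAVIOR = "PAYER_BEHAVIOR"
--     CONTRACTUAL = "CONTRACTUAL"
--     UNCLASSIFIED = "UNCLASSIFIED"
--
-- # Severity ranks (0 = most severe): CLINICAL < CODING < PAYER_BEHAVIOR < FRONT_END < CONTRACTUAL < UNCLASSIFIED.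
-- _REV = ["CLINICAL", "CODING", "PAYER_BEHAVIOR", "FRONT_END", "CONTRACTUAL", "UNCLASSIFIED"]
--
-- # One flat table: normalised CARC -> severity rank.
-- _RANK = {
--     "45": 4, "253": 4,
--     "27": 3, "26": 3, "31": 3, "35": 3, "96": 3, "109": 3, "140": 3, "204": 3,
--     "4": 1, "5": 1, "6": 1, "7": 1, "11": 1, "16": 1, "18": 2, "125": 1, "181": 1,
--     "50": 0, "55": 0, "150": 0, "167": 0, "197": 0, "198": 0,
--     "22": 2, "23": 2, "29": 2, "39": 2, "151": 2, "252": 2,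
-- }
--
-- _PREFIXES = {"CO-", "OA-", "PI-", "PR-", "CO ", "OA ", "PI ", "PR "}
--
-- def _code_rank(code):
--     """Severity rank for one CARC (5 = unclassified)."""
--     t = str(code or "").strip().upper()
--     if t[:3] in _PREFIXES:  # group-code prefixes are all 3 chars long
--         t = t[3:]
--     return _RANK.get("".join(ch for ch in t if ch.isalnum()), 5)
--
-- def classify_carc_set(codes) -> DenialCategory:
--     """Single reducing pass over the code->rank table: keep the lowest
--     rank seen, then translate that rank back to its category."""
--     best = 5
--     for c in (codes or ()):
--         r = _code_rank(c)
--         if r < best: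
--             best = r
--     return DenialCategory(_REV[best])
-- ===== Notes on version B (the rewrite author's own statement) =====
-- stated objective: alternative
-- what changed: Replaces per-code category classification via the code->category dict plus an observed-set and a second precedence scan by one flat code->severity-rank table, a prefix set membership test instead of the startswith loop, and a single min-reducing pass whose final rank indexes the reversed precedence list.
import Mathlib
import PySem

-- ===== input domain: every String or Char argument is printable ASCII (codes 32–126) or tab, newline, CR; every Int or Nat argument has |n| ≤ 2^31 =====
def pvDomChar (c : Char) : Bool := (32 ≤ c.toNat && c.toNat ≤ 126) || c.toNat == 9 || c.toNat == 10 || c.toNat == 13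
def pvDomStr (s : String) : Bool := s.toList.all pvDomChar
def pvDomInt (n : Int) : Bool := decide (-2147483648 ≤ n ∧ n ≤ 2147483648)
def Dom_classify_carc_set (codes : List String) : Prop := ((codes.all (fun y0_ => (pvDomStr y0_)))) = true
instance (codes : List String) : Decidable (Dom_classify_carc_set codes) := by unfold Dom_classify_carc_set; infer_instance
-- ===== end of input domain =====

-- B replaces A's per-code category dict + observed-set + precedence scan by one flat
-- code->severity-rank table and a single min-reducing pass (objective: alternative; same O(n) cost).

-- ===== PORT A =====
-- the DenialCategory precedence list (the literal A spells out)
def catOrder : List String :=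
  ["CLINICAL", "CODING", "PAYER_BEHAVIOR", "FRONT_END", "CONTRACTUAL", "UNCLASSIFIED"]

-- _CARC_MAP: the Python dict literal in source order (the duplicate key "18" overwrites, as in Python)
def carcMap : PySem.Dict String String := PySem.Dict.ofList
  [("45", "CONTRACTUAL"), ("253", "CONTRACTUAL"),
   ("27", "FRONT_END"), ("26", "FRONT_END"), ("31", "FRONT_END"), ("35", "FRONT_END"),
   ("96", "FRONT_END"), ("109", "FRONT_END"), ("140", "FRONT_END"), ("204", "FRONT_END"),
   ("4", "CODING"), ("5", "CODING"), ("6", "CODING"), ("7", "CODING"), ("11", "CODING"),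
   ("16", "CODING"), ("18", "CODING"), ("125", "CODING"), ("181", "CODING"),
   ("50", "CLINICAL"), ("55", "CLINICAL"), ("150", "CLINICAL"), ("167", "CLINICAL"),
   ("197", "CLINICAL"), ("198", "CLINICAL"),
   ("18", "PAYER_BEHAVIOR"), ("22", "PAYER_BEHAVIOR"), ("23", "PAYER_BEHAVIOR"),
   ("29", "PAYER_BEHAVIOR"), ("39", "PAYER_BEHAVIOR"), ("151", "PAYER_BEHAVIOR"),
   ("252", "PAYER_BEHAVIOR")]

-- the prefix loop with break: first matching prefix is stripped, then stop
def stripGroupPrefix : List String → String → String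
  | [], raw => raw
  | p :: ps, raw =>
      if PySem.Str.startswith raw p then PySem.Str.slice raw (some (PySem.Str.len p)) none
      else stripGroupPrefix ps raw

def classify_carc (code : String) : String :=
  if code = "" then "UNCLASSIFIED"
  else
    let raw := PySem.Str.upper (PySem.Str.strip code)
    let raw := stripGroupPrefix ["CO-", "OA-", "PI-", "PR-", "CO ", "OA ", "PI ", "PR "] raw
    -- "".join(ch for ch in raw if ch.isalnum()): the join of kept 1-char strings IS the
    -- filtered string (PySem.Chars.join_nil_singletons), built here directly
    let raw := String.ofList (raw.toList.filter PySem.Chars.isalnum)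
    PySem.Dict.getD carcMap raw "UNCLASSIFIED"

-- 'for cat in precedence: if cat in observed: return cat' / final 'return UNCLASSIFIED'
def scanPrec : List String → PySem.Set String → String
  | [], _ => "UNCLASSIFIED"
  | cat :: rest, obs => if PySem.Set.contains obs cat then cat else scanPrec rest obs

def classify_carc_set (codes : List String) : String :=
  -- observed = {classify_carc(c) for c in (codes or ())}  ('codes or ()' iterates the same elements)
  let observed : PySem.Set String := PySem.Set.ofList (codes.map classify_carc)
  scanPrec catOrder observed

-- ===== PORT B =====
-- _REV: rank -> category
def revCats : List String :=
  ["CLINICAL", "CODING", "PAYER_BEHAVIOR", "FRONT_END", "CONTRACTUAL", "UNCLASSIFIED"]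

-- _RANK: normalised CARC -> severity rank, one flat table
def rankMap : PySem.Dict String Int := PySem.Dict.ofList
  [("45", 4), ("253", 4),
   ("27", 3), ("26", 3), ("31", 3), ("35", 3), ("96", 3), ("109", 3), ("140", 3), ("204", 3),
   ("4", 1), ("5", 1), ("6", 1), ("7", 1), ("11", 1), ("16", 1), ("18", 2), ("125", 1), ("181", 1),
   ("50", 0), ("55", 0), ("150", 0), ("167", 0), ("197", 0), ("198", 0),
   ("22", 2), ("23", 2), ("29", 2), ("39", 2), ("151", 2), ("252", 2)]

-- _PREFIXES: the group-code prefixes, all 3 chars long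
def prefixSet : PySem.Set String :=
  PySem.Set.ofList ["CO-", "OA-", "PI-", "PR-", "CO ", "OA ", "PI ", "PR "]

def code_rank (code : String) : Int :=
  -- t = str(code or "").strip().upper()  ('code or ""' is code itself on the string domain)
  let t := PySem.Str.upper (PySem.Str.strip code)
  -- if t[:3] in _PREFIXES: t = t[3:]
  let t := if PySem.Set.contains prefixSet (PySem.Str.slice t none (some 3))
           then PySem.Str.slice t (some 3) none else t
  -- _RANK.get("".join(ch for ch in t if ch.isalnum()), 5); the join of kept 1-char strings
  -- IS the filtered string (PySem.Chars.join_nil_singletons), built here directly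
  PySem.Dict.getD rankMap (String.ofList (t.toList.filter PySem.Chars.isalnum)) 5

def classify_carc_set_alt (codes : List String) : String :=
  let best := codes.foldl (fun best c =>
    let r := code_rank c
    if r < best then r else best) 5
  -- _REV[best]: best is always in 0..5, a plain in-range index
  PySem.List.pyGetD revCats best "UNCLASSIFIED"

-- ===== PRECONDITION & SPEC =====
def Spec_classify_carc_set (codes : List String) (out : String) : Prop := out = classify_carc_set_alt codes
instance (codes : List String) (out : String) : Decidable (Spec_classify_carc_set codes out) := by unfold Spec_classify_carc_set; infer_instance

-- ===== CLAIM (what is proved, stated in full; the proofs are below) =====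
def Claim_equal_classify_carc_set : Prop := ∀ (codes : List String), Dom_classify_carc_set codes → Spec_classify_carc_set codes (classify_carc_set codes)

-- ===== LEMMAS AND PROOFS =====

-- the (Nat) precedence rank of a category string
def rnk (x : String) : Nat := (PySem.List.index? catOrder x).getD 5

-- startswith by a 3-char prefix is equality of the 3-char slice
theorem sw3 (raw p : String) (hp : p.toList.length = 3) :
    PySem.Str.startswith raw p = true ↔ PySem.Str.slice raw none (some 3) = p := by
  rw [PySem.Str.startswith_eq, PySem.Chars.startswith_iff, List.prefix_iff_eq_take,
      ← String.toList_inj, PySem.Str.toList_slice, PySem.Chars.slice_eq_listSlice,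
      PySem.List.slice_to _ (by norm_num), hp]
  exact eq_comm

theorem strip_cons (p : String) (ps : List String) (raw : String) (hp : p.toList.length = 3) :
    stripGroupPrefix (p :: ps) raw =
      if PySem.Str.slice raw none (some 3) = p then PySem.Str.slice raw (some (PySem.Str.len p)) none
      else stripGroupPrefix ps raw := by
  simp only [stripGroupPrefix]
  by_cases h : PySem.Str.startswith raw p = true
  · rw [if_pos, if_pos ((sw3 raw p hp).mp h)]; exact h
  · rw [if_neg, if_neg (fun he => h ((sw3 raw p hp).mpr he))]
    simpa using h

-- A's prefix loop IS B's take-3 membership test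
theorem strip_eq (raw : String) :
    stripGroupPrefix ["CO-", "OA-", "PI-", "PR-", "CO ", "OA ", "PI ", "PR "] raw =
      if PySem.Set.contains prefixSet (PySem.Str.slice raw none (some 3))
      then PySem.Str.slice raw (some 3) none else raw := by
  have hc : PySem.Set.contains prefixSet (PySem.Str.slice raw none (some 3)) = true ↔
      PySem.Str.slice raw none (some 3) ∈
        (["CO-", "OA-", "PI-", "PR-", "CO ", "OA ", "PI ", "PR "] : List String) := by
    rw [PySem.Set.contains_iff]; exact PySem.Set.mem_ofList _ _
  rw [strip_cons _ _ _ (by decide), strip_cons _ _ _ (by decide), strip_cons _ _ _ (by decide),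
      strip_cons _ _ _ (by decide), strip_cons _ _ _ (by decide), strip_cons _ _ _ (by decide),
      strip_cons _ _ _ (by decide), strip_cons _ _ _ (by decide)]
  simp only [stripGroupPrefix]
  generalize hg : PySem.Str.slice raw none (some 3) = s at hc
  split_ifs with h1 h2 h3 h4 h5 h6 h7 h8 <;> simp_all [PySem.Str.len]

-- key-wise bridge between the two literal dicts: value lists related by a map
theorem get?_mk_map (L : List (String × String)) (f : String → Int) (k : String) :
    (PySem.Dict.mk (L.map (fun p => (p.1, f p.2)))).get? k = ((PySem.Dict.mk L).get? k).map f := by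
  induction L with
  | nil => rfl
  | cons p L ih =>
      obtain ⟨a, b⟩ := p
      simp only [List.map_cons, PySem.Dict.get?_mk_cons]
      split_ifs <;> simp [ih]

theorem dict_rank (k : String) :
    PySem.Dict.getD rankMap k 5 = ((rnk (PySem.Dict.getD carcMap k "UNCLASSIFIED") : Nat) : Int) := by
  have hc : carcMap = PySem.Dict.mk
    [("45", "CONTRACTUAL"), ("253", "CONTRACTUAL"),
     ("27", "FRONT_END"), ("26", "FRONT_END"), ("31", "FRONT_END"), ("35", "FRONT_END"),
     ("96", "FRONT_END"), ("109", "FRONT_END"), ("140", "FRONT_END"), ("204", "FRONT_END"),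
     ("4", "CODING"), ("5", "CODING"), ("6", "CODING"), ("7", "CODING"), ("11", "CODING"),
     ("16", "CODING"), ("18", "PAYER_BEHAVIOR"), ("125", "CODING"), ("181", "CODING"),
     ("50", "CLINICAL"), ("55", "CLINICAL"), ("150", "CLINICAL"), ("167", "CLINICAL"),
     ("197", "CLINICAL"), ("198", "CLINICAL"),
     ("22", "PAYER_BEHAVIOR"), ("23", "PAYER_BEHAVIOR"),
     ("29", "PAYER_BEHAVIOR"), ("39", "PAYER_BEHAVIOR"), ("151", "PAYER_BEHAVIOR"),
     ("252", "PAYER_BEHAVIOR")] := by decide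
  have hr : rankMap = PySem.Dict.mk
    (([("45", "CONTRACTUAL"), ("253", "CONTRACTUAL"),
     ("27", "FRONT_END"), ("26", "FRONT_END"), ("31", "FRONT_END"), ("35", "FRONT_END"),
     ("96", "FRONT_END"), ("109", "FRONT_END"), ("140", "FRONT_END"), ("204", "FRONT_END"),
     ("4", "CODING"), ("5", "CODING"), ("6", "CODING"), ("7", "CODING"), ("11", "CODING"),
     ("16", "CODING"), ("18", "PAYER_BEHAVIOR"), ("125", "CODING"), ("181", "CODING"),
     ("50", "CLINICAL"), ("55", "CLINICAL"), ("150", "CLINICAL"), ("167", "CLINICAL"),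
     ("197", "CLINICAL"), ("198", "CLINICAL"),
     ("22", "PAYER_BEHAVIOR"), ("23", "PAYER_BEHAVIOR"),
     ("29", "PAYER_BEHAVIOR"), ("39", "PAYER_BEHAVIOR"), ("151", "PAYER_BEHAVIOR"),
     ("252", "PAYER_BEHAVIOR")] : List (String × String)).map
       (fun p => (p.1, ((rnk p.2 : Nat) : Int)))) := by decide
  rw [hc, hr, PySem.Dict.getD_eq_get?_getD, PySem.Dict.getD_eq_get?_getD,
      get?_mk_map _ (fun v => ((rnk v : Nat) : Int))]
  rcases h : (PySem.Dict.mk _ : PySem.Dict String String).get? k with _ | v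
  · simp; decide
  · simp

-- per-code agreement: B's rank is the precedence rank of A's category
theorem code_rank_eq (c : String) :
    code_rank c = ((rnk (classify_carc c) : Nat) : Int) := by
  by_cases h : c = ""
  · subst h; decide
  · simp only [code_rank, classify_carc, if_neg h, strip_eq]
    exact dict_rank _

theorem fold_min_le (L : List String) (a : Nat) :
    L.foldl (fun b x => min b (rnk x)) a ≤ a ∧
    ∀ x ∈ L, L.foldl (fun b x => min b (rnk x)) a ≤ rnk x := by
  induction L generalizing a with
  | nil => simp
  | cons y L ih =>
      simp only [List.foldl_cons, List.mem_cons]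
      refine ⟨le_trans (ih (min a (rnk y))).1 (by omega), ?_⟩
      rintro x (rfl | hx)
      · exact le_trans (ih (min a (rnk x))).1 (by omega)
      · exact (ih (min a (rnk y))).2 x hx

theorem fold_min_attained (L : List String) (a : Nat) :
    L.foldl (fun b x => min b (rnk x)) a = a ∨
    ∃ x ∈ L, rnk x = L.foldl (fun b x => min b (rnk x)) a := by
  induction L generalizing a with
  | nil => left; rfl
  | cons y L ih =>
      simp only [List.foldl_cons, List.mem_cons]
      rcases ih (min a (rnk y)) with h | ⟨x, hx, hr⟩
      · rw [h]
        rcases le_total a (rnk y) with hle | hle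
        · left; omega
        · right; exact ⟨y, Or.inl rfl, by omega⟩
      · right; exact ⟨x, Or.inr hx, hr⟩

-- B's Int-valued reducing loop is the cast of the Nat min-fold over A's categories
theorem fold_cast (L : List String) (a : Nat) :
    L.foldl (fun best c =>
        let r := code_rank c
        if r < best then r else best) ((a : Nat) : Int)
      = (((L.map classify_carc).foldl (fun b x => min b (rnk x)) a : Nat) : Int) := by
  induction L generalizing a with
  | nil => simp
  | cons c L ih =>
      simp only [List.foldl_cons, List.map_cons, code_rank_eq c]
      rw [show (if ((rnk (classify_carc c) : Nat) : Int) < ((a : Nat) : Int)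
              then ((rnk (classify_carc c) : Nat) : Int) else ((a : Nat) : Int))
            = ((min a (rnk (classify_carc c)) : Nat) : Int) from by split_ifs with h <;> omega]
      exact ih _

theorem classify_carc_mem_catOrder (c : String) : classify_carc c ∈ catOrder := by
  unfold classify_carc
  split
  · decide
  · rcases h : PySem.Dict.get? carcMap
      (String.ofList (((stripGroupPrefix ["CO-", "OA-", "PI-", "PR-", "CO ", "OA ", "PI ", "PR "]
        (PySem.Str.upper (PySem.Str.strip c)))).toList.filter PySem.Chars.isalnum)) with _ | v
    · simp only [PySem.Dict.getD_eq_get?_getD, h, Option.getD_none]; decide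
    · simp only [PySem.Dict.getD_eq_get?_getD, h, Option.getD_some]
      have hmem := PySem.Dict.mem_items_of_get?_eq_some carcMap h
      have hvals : ∀ p ∈ carcMap.items, p.2 ∈ catOrder := by decide
      exact hvals _ hmem

-- A's precedence scan over the observed set returns the category at the minimal rank
theorem scan_eq (L : List String) (m : Nat) (hm : m ≤ 5)
    (hmem : ∀ x ∈ L, x ∈ catOrder)
    (hlow : ∀ x ∈ L, m ≤ rnk x)
    (hex : m = 5 ∨ ∃ x ∈ L, rnk x = m) :
    scanPrec catOrder (PySem.Set.ofList L) = catOrder.getD m "UNCLASSIFIED" := by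
  have hcon : ∀ y, PySem.Set.contains (PySem.Set.ofList L) y = true ↔ y ∈ L := by
    intro y
    exact (PySem.Set.contains_iff _ _).trans (PySem.Set.mem_ofList _ _)
  have hf : ∀ y, rnk y < m → y ∉ L := by
    intro y hy hmemL
    exact absurd (hlow y hmemL) (by omega)
  have ht : m < 5 → catOrder.getD m "UNCLASSIFIED" ∈ L := by
    intro h5
    rcases hex with h | ⟨x, hx, hr⟩
    · omega
    · have hinv : ∀ x ∈ catOrder, catOrder.getD (rnk x) "UNCLASSIFIED" = x := by decide
      rw [← hr, hinv x (hmem x hx)]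
      exact hx
  interval_cases m
  · have c0 := ht (by omega)
    simp [catOrder, List.getD] at c0
    simp [scanPrec, catOrder, List.getD, c0]
  · have f0 := hf "CLINICAL" (by decide)
    have c1 := ht (by omega)
    simp [catOrder, List.getD] at c1
    simp [scanPrec, catOrder, List.getD, f0, c1]
  · have f0 := hf "CLINICAL" (by decide)
    have f1 := hf "CODING" (by decide)
    have c2 := ht (by omega)
    simp [catOrder, List.getD] at c2
    simp [scanPrec, catOrder, List.getD, f0, f1, c2]
  · have f0 := hf "CLINICAL" (by decide)
    have f1 := hf "CODING" (by decide)
    have f2 := hf "PAYER_BEHAVIOR" (by decide)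
    have c3 := ht (by omega)
    simp [catOrder, List.getD] at c3
    simp [scanPrec, catOrder, List.getD, f0, f1, f2, c3]
  · have f0 := hf "CLINICAL" (by decide)
    have f1 := hf "CODING" (by decide)
    have f2 := hf "PAYER_BEHAVIOR" (by decide)
    have f3 := hf "FRONT_END" (by decide)
    have c4 := ht (by omega)
    simp [catOrder, List.getD] at c4
    simp [scanPrec, catOrder, List.getD, f0, f1, f2, f3, c4]
  · have f0 := hf "CLINICAL" (by decide)
    have f1 := hf "CODING" (by decide)
    have f2 := hf "PAYER_BEHAVIOR" (by decide)
    have f3 := hf "FRONT_END" (by decide)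
    have f4 := hf "CONTRACTUAL" (by decide)
    simp [scanPrec, catOrder, List.getD, f0, f1, f2, f3, f4]

-- ===== VERDICT (by name: the statement is the Claim_ definition above) =====
theorem classify_carc_set_spec : Claim_equal_classify_carc_set := by
  intro codes _
  unfold Spec_classify_carc_set classify_carc_set classify_carc_set_alt
  rw [show (5 : Int) = ((5 : Nat) : Int) from rfl, fold_cast codes 5,
      PySem.List.pyGetD_natCast]
  have hmem : ∀ x ∈ codes.map classify_carc, x ∈ catOrder := by
    intro x hx
    rcases List.mem_map.mp hx with ⟨c, _, rfl⟩
    exact classify_carc_mem_catOrder c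
  rw [show revCats = catOrder from rfl]
  exact (scan_eq (codes.map classify_carc) _
    ((fold_min_le _ 5).1) hmem ((fold_min_le _ 5).2) (fold_min_attained _ 5)).symm ▸ rfl
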